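-- pv_equiv track=rewrite | github.com/vitamin33/threads-agent | .dev-system/agents/coordination.py | _find_impacted_services
-- ===== SOURCE A (Python) =====
-- from typing import Dict, List, Any, Optional
--
-- def _find_impacted_services(changed_services: List[str], target_services: List[str]) -> List[str]:
--     """Find which target services might be impacted by changes"""
--
--     # Service dependency mapping
--     service_dependencies = {
--         'persona_runtime': ['orchestrator'],  # Depends on task routing
--         'viral_engine': ['orchestrator'],     # Depends on task coordination
--         'dashboard_api': ['celery_worker'],   # Depends on background processing
--         'revenue': ['orchestrator'],          # Depends on API routing
--         'achievement_collector': ['orchestrator'], # Depends on data flow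
--         'threads_adaptor': ['orchestrator']   # Depends on API coordination
--     }
--
--     impacted = []
--
--     for target_service in target_services:
--         dependencies = service_dependencies.get(target_service, [])
--
--         # Check if any changed service affects this target
--         for changed_service in changed_services:
--             if changed_service in dependencies:
--                 impacted.append(target_service)
--                 break
--
--     return impacted
-- ===== SOURCE B (Python) =====
-- def _find_impacted_services(changed_services, target_services):
--     """Find which target services might be impacted by changes (inverted map)."""
--     reverse_deps = {
--         'orchestrator': ['persona_runtime', 'viral_engine', 'revenue',
--                          'achievement_collector', 'threads_adaptor'],
--         'celery_worker': ['dashboard_api'],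
--     }
--     impacted_set = set()
--     for changed in changed_services:
--         impacted_set.update(reverse_deps.get(changed, []))
--     return [t for t in target_services if t in impacted_set]
-- ===== Notes on version B (the rewrite author's own statement) =====
-- stated objective: faster
-- what changed: Replaces the nested scan over changed_services with a break by a hardcoded inverted dependency map: one pass unions reverse_deps[changed] into a set, then a single order-preserving membership filter over target_services.
import Mathlib
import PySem

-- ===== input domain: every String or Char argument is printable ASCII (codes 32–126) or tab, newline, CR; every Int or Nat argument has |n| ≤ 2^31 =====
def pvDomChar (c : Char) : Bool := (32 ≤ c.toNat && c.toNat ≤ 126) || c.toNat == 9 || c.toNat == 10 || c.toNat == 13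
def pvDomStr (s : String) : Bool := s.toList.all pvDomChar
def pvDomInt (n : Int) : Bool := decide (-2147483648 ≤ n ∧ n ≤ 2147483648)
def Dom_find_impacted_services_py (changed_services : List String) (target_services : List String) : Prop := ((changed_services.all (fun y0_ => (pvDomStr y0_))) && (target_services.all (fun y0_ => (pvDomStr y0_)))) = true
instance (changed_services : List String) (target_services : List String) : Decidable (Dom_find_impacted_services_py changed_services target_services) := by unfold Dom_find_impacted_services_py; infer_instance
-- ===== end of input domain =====

-- B replaces A's nested scan-with-break by a hardcoded inverted dependency map:
-- build an impacted set from changed_services, then one order-preserving filter over target_services.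

-- ===== PORT A =====
-- the service_dependencies dict of A, as a PySem.Dict in insertion order
def pvServiceDeps : PySem.Dict String (List String) := PySem.Dict.ofList
  [("persona_runtime", ["orchestrator"]),
   ("viral_engine", ["orchestrator"]),
   ("dashboard_api", ["celery_worker"]),
   ("revenue", ["orchestrator"]),
   ("achievement_collector", ["orchestrator"]),
   ("threads_adaptor", ["orchestrator"])]

-- A's inner 'for changed_service in changed_services: if … : append; break' loop,
-- returned as the Bool 'did we break (append)'.
def pvInnerScan (deps : List String) : List String → Bool
  | [] => false
  | c :: rest => if deps.contains c then true else pvInnerScan deps rest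

def find_impacted_services_py (changed_services : List String) (target_services : List String) : List String :=
  target_services.foldl
    (fun impacted target_service =>
      let dependencies := pvServiceDeps.getD target_service []
      if pvInnerScan dependencies changed_services then impacted ++ [target_service]
      else impacted)
    []

-- ===== PORT B =====
def pvReverseDeps : PySem.Dict String (List String) := PySem.Dict.ofList
  [("orchestrator", ["persona_runtime", "viral_engine", "revenue",
                     "achievement_collector", "threads_adaptor"]),
   ("celery_worker", ["dashboard_api"])]

def find_impacted_services_py_alt (changed_services : List String) (target_services : List String) : List String :=
  let impacted_set : PySem.Set String :=
    changed_services.foldl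
      (fun s changed => PySem.Set.update s (pvReverseDeps.getD changed []))
      PySem.Set.empty
  target_services.filter (fun t => PySem.Set.contains impacted_set t)

-- ===== PRECONDITION & SPEC =====
def Spec_find_impacted_services_py (changed_services : List String) (target_services : List String) (out : List String) : Prop := out = find_impacted_services_py_alt changed_services target_services
instance (changed_services : List String) (target_services : List String) (out : List String) : Decidable (Spec_find_impacted_services_py changed_services target_services out) := by unfold Spec_find_impacted_services_py; infer_instance

-- ===== CLAIM (what is proved, stated in full; the proofs are below) =====
def Claim_equal_find_impacted_services_py : Prop := ∀ (changed_services : List String) (target_services : List String), Dom_find_impacted_services_py changed_services target_services → Spec_find_impacted_services_py changed_services target_services (find_impacted_services_py changed_services target_services)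

-- ===== LEMMAS AND PROOFS =====

-- A's inner break-loop is an 'any' over changed_services
theorem pvInnerScan_eq_any (deps : List String) (cs : List String) :
    pvInnerScan deps cs = cs.any (fun c => deps.contains c) := by
  induction cs with
  | nil => rfl
  | cons c rest ih =>
      simp only [pvInnerScan, List.any_cons]
      by_cases h : deps.contains c = true <;> simp_all

-- membership in Set.update
theorem pvMem_update (s : PySem.Set String) (l : List String) (t : String) :
    t ∈ PySem.Set.update s l ↔ t ∈ s ∨ t ∈ l := by
  induction l generalizing s with
  | nil => simp [PySem.Set.update]
  | cons x xs ih =>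
      simp [PySem.Set.update] at ih ⊢
      rw [ih]
      simp [PySem.Set.mem_add]
      tauto

-- membership in B's accumulated impacted set
theorem pvMem_fold (cs : List String) (s : PySem.Set String) (t : String) :
    t ∈ cs.foldl (fun s c => PySem.Set.update s (pvReverseDeps.getD c [])) s ↔
      t ∈ s ∨ ∃ c ∈ cs, t ∈ pvReverseDeps.getD c [] := by
  induction cs generalizing s with
  | nil => simp
  | cons c rest ih =>
      simp only [List.foldl_cons]
      rw [ih]
      rw [pvMem_update]
      simp only [List.mem_cons]
      constructor
      · rintro (⟨h | h⟩ | ⟨x, hx, ht⟩)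
        · exact Or.inl h
        · exact Or.inr ⟨c, Or.inl rfl, h⟩
        · exact Or.inr ⟨x, Or.inr hx, ht⟩
      · rintro (h | ⟨x, hx | hx, ht⟩)
        · exact Or.inl (Or.inl h)
        · exact Or.inl (Or.inr (hx ▸ ht))
        · exact Or.inr ⟨x, hx, ht⟩

-- the crux: forward and inverted maps describe the same relation
theorem pvDeps_inverse (t c : String) :
    c ∈ pvServiceDeps.getD t [] ↔ t ∈ pvReverseDeps.getD c [] := by
  have hA : pvServiceDeps = PySem.Dict.mk
      [("persona_runtime", ["orchestrator"]),
       ("viral_engine", ["orchestrator"]),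
       ("dashboard_api", ["celery_worker"]),
       ("revenue", ["orchestrator"]),
       ("achievement_collector", ["orchestrator"]),
       ("threads_adaptor", ["orchestrator"])] := by decide
  have hB : pvReverseDeps = PySem.Dict.mk
      [("orchestrator", ["persona_runtime", "viral_engine", "revenue",
                         "achievement_collector", "threads_adaptor"]),
       ("celery_worker", ["dashboard_api"])] := by decide
  rw [hA, hB]
  simp only [PySem.Dict.getD_eq_get?_getD, PySem.Dict.get?_mk_cons]
  by_cases h1 : t = "persona_runtime" <;>
  by_cases h2 : t = "viral_engine" <;>
  by_cases h3 : t = "dashboard_api" <;>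
  by_cases h4 : t = "revenue" <;>
  by_cases h5 : t = "achievement_collector" <;>
  by_cases h6 : t = "threads_adaptor" <;>
  by_cases g1 : c = "orchestrator" <;>
  by_cases g2 : c = "celery_worker" <;>
    subst_vars <;> (try simp_all [PySem.Dict.get?]) <;> split_ifs <;> simp_all

theorem pv_pointwise (cs : List String) (t : String) :
    pvInnerScan (pvServiceDeps.getD t []) cs =
      PySem.Set.contains
        (cs.foldl (fun s c => PySem.Set.update s (pvReverseDeps.getD c [])) PySem.Set.empty) t := by
  rw [pvInnerScan_eq_any, Bool.eq_iff_iff]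
  simp only [List.any_eq_true, PySem.Set.contains_iff]
  rw [pvMem_fold]
  simp only [PySem.Set.empty, List.not_mem_nil, false_or]
  apply exists_congr; intro c
  apply and_congr_right; intro _
  simp only [List.contains_iff_mem]
  exact pvDeps_inverse t c

-- ===== VERDICT (by name: the statement is the Claim_ definition above) =====
theorem find_impacted_services_py_spec : Claim_equal_find_impacted_services_py := by
  intro cs ts _
  unfold Spec_find_impacted_services_py find_impacted_services_py find_impacted_services_py_alt
  simp only []
  rw [PySem.List.foldl_append_if_eq_filter]
  simp only [List.nil_append]
  apply List.filter_congr
  intro t _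
  exact pv_pointwise cs t
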